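-- pv_equiv track=rewrite | github.com/akash-1797/array_and_list | finding_duplicates.py | finding_duplicates
-- ===== SOURCE A (Python) =====
-- def finding_duplicates(arr):
--   a = []
--   n = len(arr)
--   last_duplicate = 0
--   i = 0
--   while(i<=n-2):
--     if arr[i] == arr[i+1] and arr[i] != last_duplicate:
--       last_duplicate = arr[i]
--       a.append(last_duplicate)
--     i = i+1
--   return a
-- ===== SOURCE B (Python) =====
-- def finding_duplicates(arr):
--     # phase 1: compress arr into maximal runs of equal consecutive values
--     runs = []
--     i = 0
--     n = len(arr)
--     while i < n:
--         j = i
--         while j < n and arr[j] == arr[i]: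
--             j += 1
--         runs.append((arr[i], j - i))
--         i = j
--     # phase 2: emit each run of length >= 2 whose value differs from the last emitted (init 0)
--     out = []
--     last = 0
--     for v, k in runs:
--         if k >= 2 and v != last:
--             out.append(v)
--             last = v
--     return out
-- ===== Notes on version B (the rewrite author's own statement) =====
-- stated objective: alternative
-- what changed: A's single while-loop comparing adjacent indices arr[i]==arr[i+1] is replaced by a two-phase decomposition: first compress the list into maximal runs (value, length), then a second pass emits each run of length >= 2 whose value differs from the last emitted (initialized 0).
import Mathlib
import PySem

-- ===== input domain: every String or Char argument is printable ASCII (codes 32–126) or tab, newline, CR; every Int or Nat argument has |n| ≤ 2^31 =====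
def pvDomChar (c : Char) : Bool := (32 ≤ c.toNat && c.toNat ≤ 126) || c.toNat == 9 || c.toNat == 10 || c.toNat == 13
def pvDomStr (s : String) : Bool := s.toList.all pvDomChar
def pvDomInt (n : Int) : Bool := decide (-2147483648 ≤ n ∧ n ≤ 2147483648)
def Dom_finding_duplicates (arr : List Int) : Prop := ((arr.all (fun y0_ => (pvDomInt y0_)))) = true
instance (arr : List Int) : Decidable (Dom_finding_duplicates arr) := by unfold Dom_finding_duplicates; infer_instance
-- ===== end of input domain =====

-- B replaces A's inline adjacent-index while-loop with a two-phase decomposition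
-- (compress into maximal runs, then emit runs of length ≥ 2 with the stateful dedup);
-- objective: alternative structure, same cost.

-- ===== PORT A =====
-- while i <= n-2: ported as a foldl over range(0, n-1) carrying (a, last_duplicate)
def finding_duplicates (arr : List Int) : List Int :=
  let n : Int := arr.length
  ((PySem.List.pyRange 0 (n - 1) 1).foldl
    (fun (st : List Int × Int) i =>
      let x := PySem.List.pyGetD arr i 0
      let y := PySem.List.pyGetD arr (i + 1) 0
      if x = y ∧ x ≠ st.2 then (st.1 ++ [x], x) else st)
    ([], 0)).1

-- ===== PORT B =====
-- phase 1 of Source B: the outer while strips one maximal run per step (the inner while,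
-- which counts the equal prefix, is the span of values equal to the head)
def pvRuns : List Int → List (Int × Nat)
  | [] => []
  | x :: xs =>
    let p := xs.span (fun v => v = x)
    (x, p.1.length + 1) :: pvRuns p.2
termination_by l => l.length
decreasing_by
  simp only [List.span_eq_takeWhile_dropWhile]
  have := List.length_dropWhile_le (p := fun v => decide (v = x)) (l := xs)
  simp; omega

-- phase 2 of Source B: emit runs of length >= 2 whose value differs from the last emitted
def finding_duplicates_alt (arr : List Int) : List Int :=
  ((pvRuns arr).foldl
    (fun (st : List Int × Int) vk =>
      if 2 ≤ vk.2 ∧ vk.1 ≠ st.2 then (st.1 ++ [vk.1], vk.1) else st)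
    ([], 0)).1

-- ===== PRECONDITION & SPEC =====
def Spec_finding_duplicates (arr : List Int) (out : List Int) : Prop := out = finding_duplicates_alt arr
instance (arr : List Int) (out : List Int) : Decidable (Spec_finding_duplicates arr out) := by unfold Spec_finding_duplicates; infer_instance

-- ===== CLAIM (what is proved, stated in full; the proofs are below) =====
def Claim_equal_finding_duplicates : Prop := ∀ (arr : List Int), Dom_finding_duplicates arr → Spec_finding_duplicates arr (finding_duplicates arr)

-- ===== LEMMAS AND PROOFS =====

-- middleman: a structural pair-scan with the stateful dedup; both ports reduce to it
def pvScan : Int → List Int → List Int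
  | _, [] => []
  | _, [_] => []
  | last, x :: y :: rest =>
    if x = y ∧ x ≠ last then x :: pvScan x (y :: rest) else pvScan last (y :: rest)

-- A's index loop reads exactly the list of adjacent pairs
theorem pvPairs_eq_zip (arr : List Int) :
    (PySem.List.pyRange 0 ((arr.length : Int) - 1) 1).map
      (fun i => (PySem.List.pyGetD arr i 0, PySem.List.pyGetD arr (i+1) 0))
      = arr.zip arr.tail := by
  have hg : ∀ m : Nat, m < arr.length → PySem.List.pyGetD arr (m:Int) 0 = arr[m]! := by
    intro m hm
    simp [PySem.List.pyGetD_natCast, hm]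
  apply List.ext_getElem
  · simp [PySem.List.length_pyRange_one]
  · intro k h1 h2
    have hk : k < arr.length - 1 := by
      simp [PySem.List.length_pyRange_one] at h1; omega
    simp only [List.getElem_map, PySem.List.getElem_pyRange_one, zero_add]
    have e1 : PySem.List.pyGetD arr (k:Int) 0 = arr[k]! := hg k (by omega)
    have e2 : PySem.List.pyGetD arr ((k:Int)+1) 0 = arr[k+1]! := by
      have := hg (k+1) (by omega); push_cast at this; exact this
    rw [e1, e2, List.getElem_zip]
    simp [List.getElem_tail, List.getElem!_eq_getElem?_getD,
      List.getElem?_eq_getElem (show k < arr.length by omega),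
      List.getElem?_eq_getElem (show k+1 < arr.length by omega)]

-- folding A's step over the adjacent pairs is the structural pair-scan
theorem pvZipFold_eq_scan (arr : List Int) : ∀ (acc : List Int) (last : Int),
    ((arr.zip arr.tail).foldl
      (fun (st : List Int × Int) p =>
        if p.1 = p.2 ∧ p.1 ≠ st.2 then (st.1 ++ [p.1], p.1) else st)
      (acc, last)).1 = acc ++ pvScan last arr := by
  induction arr with
  | nil => intro acc last; simp [pvScan]
  | cons x xs ih =>
    intro acc last
    match xs with
    | [] => simp [pvScan]
    | y :: rest =>
      simp only [List.tail_cons, List.zip_cons_cons, List.foldl_cons, pvScan]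
      simp only [List.tail_cons] at ih
      by_cases h : x = y ∧ x ≠ last
      · simp only [if_pos h]
        rw [ih (acc ++ [x]) x]
        simp [h]
      · simp only [if_neg h]
        rw [ih acc last]

theorem pvA_eq_scan (arr : List Int) : finding_duplicates arr = pvScan 0 arr := by
  have h := pvZipFold_eq_scan arr [] 0
  rw [← pvPairs_eq_zip, List.foldl_map] at h
  simpa [finding_duplicates] using h

-- scanning one maximal run: emits the value iff the run has length ≥ 2 and differs from `last`
theorem pvScan_run (x : Int) (rest : List Int)
    (hr : rest = [] ∨ rest.head? ≠ some x) :
    ∀ (pre : List Int) (last : Int), (∀ v ∈ pre, v = x) →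
    pvScan last (x :: (pre ++ rest)) =
      (if pre ≠ [] ∧ x ≠ last then [x] else []) ++
        pvScan (if pre ≠ [] ∧ x ≠ last then x else last) rest := by
  intro pre
  induction pre with
  | nil =>
    intro last _
    rw [if_neg (by simp), if_neg (by simp)]
    simp only [List.nil_append]
    match rest, hr with
    | [], _ => simp [pvScan]
    | y :: t, hr =>
      have hy : y ≠ x := by simpa using hr
      simp only [pvScan]
      rw [if_neg (by rintro ⟨h, _⟩; exact hy h.symm)]
  | cons p ps ih =>
    intro last hall
    have hp : p = x := hall p (by simp)
    subst hp
    simp only [List.cons_append, pvScan]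
    by_cases hlx : p = last
    · rw [if_neg (by rintro ⟨_, h⟩; exact h hlx)]
      rw [ih last (fun v hv => hall v (by simp [hv]))]
      simp [hlx]
    · simp only [true_and]
      rw [if_pos hlx]
      rw [ih p (fun v hv => hall v (by simp [hv]))]
      rw [if_neg (by rintro ⟨_, h⟩; exact h rfl)]
      simp [hlx]

-- folding B's emit step over the runs is the structural pair-scan
theorem pvRunsFoldAux : ∀ (n : Nat) (arr : List Int), arr.length ≤ n →
    ∀ (acc : List Int) (last : Int),
    ((pvRuns arr).foldl
      (fun (st : List Int × Int) vk =>
        if 2 ≤ vk.2 ∧ vk.1 ≠ st.2 then (st.1 ++ [vk.1], vk.1) else st)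
      (acc, last)).1 = acc ++ pvScan last arr := by
  intro n
  induction n with
  | zero =>
    intro arr hlen acc last
    have : arr = [] := List.eq_nil_of_length_eq_zero (by omega)
    subst this
    simp [pvRuns, pvScan]
  | succ n ihn =>
    intro arr hlen acc last
    match arr with
    | [] => simp [pvRuns, pvScan]
    | x :: xs =>
      simp only [pvRuns, List.span_eq_takeWhile_dropWhile, List.foldl_cons]
      have hsplit : xs = xs.takeWhile (fun v => decide (v = x)) ++ xs.dropWhile (fun v => decide (v = x)) :=
        (List.takeWhile_append_dropWhile).symm
      have hall : ∀ v ∈ xs.takeWhile (fun v => decide (v = x)), v = x := by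
        intro v hv
        have := List.mem_takeWhile_imp hv
        simpa using this
      have hhead : xs.dropWhile (fun v => decide (v = x)) = [] ∨
          (xs.dropWhile (fun v => decide (v = x))).head? ≠ some x := by
        match hd : xs.dropWhile (fun v => decide (v = x)) with
        | [] => left; rfl
        | z :: zs =>
          right
          have := List.head?_dropWhile_not (fun v => decide (v = x)) xs
          rw [hd] at this
          simp at this ⊢
          exact this
      have hd : (xs.dropWhile (fun v => decide (v = x))).length ≤ n := by
        have := List.length_dropWhile_le (p := fun v => decide (v = x)) (l := xs)
        simp at hlen
        omega
      rw [show pvScan last (x :: xs) = pvScan last (x :: (xs.takeWhile (fun v => decide (v = x)) ++ xs.dropWhile (fun v => decide (v = x)))) by rw [← hsplit]]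
      rw [pvScan_run x _ hhead _ last hall]
      by_cases hc : xs.takeWhile (fun v => decide (v = x)) ≠ [] ∧ x ≠ last
      · have h2 : 2 ≤ (xs.takeWhile (fun v => decide (v = x))).length + 1 ∧ x ≠ last := by
          have : 0 < (xs.takeWhile (fun v => decide (v = x))).length :=
            List.length_pos_of_ne_nil hc.1
          exact ⟨by omega, hc.2⟩
        rw [if_pos h2, if_pos hc, if_pos hc, ihn _ hd (acc ++ [x]) x]
        simp
      · have h2 : ¬(2 ≤ (xs.takeWhile (fun v => decide (v = x))).length + 1 ∧ x ≠ last) := by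
          intro ⟨ha, hb⟩
          exact hc ⟨by intro hnil; simp [hnil] at ha, hb⟩
        rw [if_neg h2, if_neg hc, if_neg hc, ihn _ hd acc last]
        simp

theorem pvB_eq_scan (arr : List Int) : finding_duplicates_alt arr = pvScan 0 arr := by
  simpa [finding_duplicates_alt] using pvRunsFoldAux arr.length arr le_rfl [] 0

-- ===== VERDICT (by name: the statement is the Claim_ definition above) =====
theorem finding_duplicates_spec : Claim_equal_finding_duplicates := by
  intro arr _
  unfold Spec_finding_duplicates
  rw [pvA_eq_scan, pvB_eq_scan]
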